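-- pv_equiv track=rewrite | github.com/jamiechan29/test | hw0-1_bonus.py | Decomposition
-- ===== SOURCE A (Python) =====
-- def Decomposition(varTerm):
--     # varTerm is empty indicate it is constant
--     if not varTerm:
--         return {'': 0}
--     # Using dictionary to store the information of variable term
--     # i.e. A^2B^10C will store as {'A': 2, 'B': 10, 'C': 1}
--     variable = {}
--     # If first character is alphabet, then find the next position of alphabet.
--     for index in range(len(varTerm)):
--         if varTerm[index].isalpha():
--             end = index + 1
--             for i in range(index+1, len(varTerm)):
--                 if varTerm[i].isnumeric():
--                     end = end + 1
--                 else: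
--                     break
--             # If varTerm[index+1:end] is not empty, store the power; otherwise, store 1
--             if varTerm[index+1:end]:
--                 variable[varTerm[index]] = int(varTerm[index+1:end])
--             else:
--                 variable[varTerm[index]] = 1
--     return variable
-- ===== SOURCE B (Python) =====
-- def Decomposition(varTerm):
--     # Single-pass state machine over characters (A rescans with nested index loops).
--     if not varTerm:
--         return {'': 0}
--     variable = {}
--     current = None
--     num = ''
--     def finalize():
--         nonlocal current, num
--         if current is not None:
--             variable[current] = int(num) if num else 1
--         current = None
--         num = ''
--     for ch in varTerm:
--         if ch.isalpha():
--             finalize()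
--             current = ch
--         elif ch.isnumeric():
--             if current is not None:
--                 num += ch
--         else:
--             finalize()
--     finalize()
--     return variable
-- ===== Notes on version B (the rewrite author's own statement) =====
-- stated objective: faster
-- what changed: Replaces A's index-based outer loop with a per-variable look-ahead rescan, slicing and re-parsing via int() by a single state-machine pass over the characters that accumulates the current variable and its digit run directly (constant-factor: no inner rescan, no slicing, no repeated indexing).
import Mathlib
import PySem

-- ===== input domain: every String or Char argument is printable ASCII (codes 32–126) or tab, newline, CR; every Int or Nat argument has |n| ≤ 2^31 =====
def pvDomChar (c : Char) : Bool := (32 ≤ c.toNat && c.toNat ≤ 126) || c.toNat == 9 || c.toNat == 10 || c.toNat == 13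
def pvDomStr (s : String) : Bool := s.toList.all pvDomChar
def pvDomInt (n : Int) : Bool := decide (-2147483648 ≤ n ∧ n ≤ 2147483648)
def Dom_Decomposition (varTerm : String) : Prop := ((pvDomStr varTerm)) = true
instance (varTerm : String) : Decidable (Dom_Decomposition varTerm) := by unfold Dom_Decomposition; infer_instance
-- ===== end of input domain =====

-- B replaces A's nested index/slice rescans by a single state-machine pass over the characters (objective: alternative decomposition; same return value).

-- Python's ch.isnumeric(); on the admitted ASCII domain it coincides with isdigit (only '0'-'9').
def pvIsNum (c : Char) : Bool := PySem.Chars.isdigit c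

-- ===== PORT A =====
-- inner loop: 'end = index+1; for i in range(index+1, len): if s[i].isnumeric(): end += 1 else: break'
-- (the pyGet? 'none' branch is unreachable: every i produced by the range is in bounds)
def DecompInner (cs : List Char) : List Int → Int → Int
  | [], e => e
  | i :: rest, e =>
    match PySem.List.pyGet? cs i with
    | some c => if pvIsNum c then DecompInner cs rest (e + 1) else e
    | none => e

-- A's outer loop body, at index 'index' with dict 'vdict' ('variable' in the Python)
def DecompBody (cs : List Char) (vdict : PySem.Dict String Int) (index : Int) :
    PySem.Dict String Int :=
  match PySem.List.pyGet? cs index with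
  | none => vdict  -- unreachable: index < len
  | some c =>
    if PySem.Chars.isalpha c then
      let e := DecompInner cs (PySem.List.pyRange (index + 1) ((cs.length : Int)) 1) (index + 1)
      let pw := PySem.List.slice cs (some (index + 1)) (some e)
      if pw ≠ [] then
        -- int(varTerm[index+1:end]); pw is a nonempty run of isnumeric chars, so on the
        -- admitted ASCII domain ofChars? never returns none and the default 0 is unreachable
        vdict.insert (String.mk [c]) ((PySem.Int.ofChars? pw).getD 0)
      else
        vdict.insert (String.mk [c]) 1
    else vdict

def Decomposition (varTerm : String) : List (String × Int) :=
  if varTerm.toList = [] then [("", 0)] else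
  let cs := varTerm.toList
  ((PySem.List.pyRange 0 ((cs.length : Int)) 1).foldl (DecompBody cs) PySem.Dict.empty).items

-- ===== PORT B =====
-- 'finalize()': close the open variable (int(num) if num else 1); on the admitted ASCII domain
-- num is a nonempty digit run whenever it is consulted, so ofChars?'s default 0 is unreachable
def DecompFin (vdict : PySem.Dict String Int) (current : Option Char) (num : List Char) :
    PySem.Dict String Int :=
  match current with
  | some c => vdict.insert (String.mk [c]) (if num = [] then 1 else (PySem.Int.ofChars? num).getD 0)
  | none => vdict

def DecompStep (st : PySem.Dict String Int × Option Char × List Char) (ch : Char) :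
    PySem.Dict String Int × Option Char × List Char :=
  if PySem.Chars.isalpha ch then (DecompFin st.1 st.2.1 st.2.2, some ch, [])
  else if pvIsNum ch then
    (if st.2.1.isSome then (st.1, st.2.1, st.2.2 ++ [ch]) else st)
  else (DecompFin st.1 st.2.1 st.2.2, none, [])

def Decomposition_alt (varTerm : String) : List (String × Int) :=
  if varTerm.toList = [] then [("", 0)] else
  let st := varTerm.toList.foldl DecompStep (PySem.Dict.empty, none, [])
  (DecompFin st.1 st.2.1 st.2.2).items

-- ===== PRECONDITION & SPEC =====
def Spec_Decomposition (varTerm : String) (out : List (String × Int)) : Prop := out = Decomposition_alt varTerm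
instance (varTerm : String) (out : List (String × Int)) : Decidable (Spec_Decomposition varTerm out) := by unfold Spec_Decomposition; infer_instance

-- ===== CLAIM (what is proved, stated in full; the proofs are below) =====
def Claim_equal_Decomposition : Prop := ∀ (varTerm : String), Dom_Decomposition varTerm → Spec_Decomposition varTerm (Decomposition varTerm)

-- ===== LEMMAS AND PROOFS =====

-- reference: value stored for a variable followed by the digit run 'ds'
def pvVal (ds : List Char) : Int := if ds = [] then 1 else (PySem.Int.ofChars? ds).getD 0

-- reference recursion both ports are reduced to
def pvRun (d : PySem.Dict String Int) : List Char → PySem.Dict String Int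
  | [] => d
  | c :: rest =>
    pvRun (if PySem.Chars.isalpha c then
             d.insert (String.mk [c]) (pvVal (rest.takeWhile pvIsNum))
           else d) rest

-- B's fold result followed by the final finalize, as a function of the state
def pvFinSt (st : PySem.Dict String Int × Option Char × List Char) : PySem.Dict String Int :=
  DecompFin st.1 st.2.1 st.2.2

theorem pvIsNum_not_alpha {c : Char} (h : pvIsNum c = true) : PySem.Chars.isalpha c = false := by
  simp [pvIsNum, PySem.Chars.isdigit, Char.le_def, UInt32.le_iff_toNat_le] at h
  simp [PySem.Chars.isalpha, PySem.Chars.isupper, PySem.Chars.islower,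
    Char.le_def, UInt32.le_iff_toNat_le]
  constructor <;> intro h' <;> omega

theorem pvAlpha_not_num {c : Char} (h : PySem.Chars.isalpha c = true) : pvIsNum c = false := by
  by_cases h' : pvIsNum c = true
  · rw [pvIsNum_not_alpha h'] at h; exact absurd h (by simp)
  · simpa using h'

theorem pvRun_skip (d : PySem.Dict String Int) (c : Char) (l : List Char)
    (h : PySem.Chars.isalpha c = false) : pvRun d (c :: l) = pvRun d l := by
  simp [pvRun, h]

theorem pvRun_dropWhile (l : List Char) (d : PySem.Dict String Int) :
    pvRun d (l.dropWhile pvIsNum) = pvRun d l := by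
  induction l generalizing d with
  | nil => rfl
  | cons x rest ih =>
    by_cases hx : pvIsNum x = true
    · rw [List.dropWhile_cons_of_pos hx, ih, pvRun_skip d x rest (pvIsNum_not_alpha hx)]
    · rw [List.dropWhile_cons_of_neg (by simpa using hx)]

theorem pvTake_takeWhile (l : List Char) (p : Char → Bool) :
    l.take (l.takeWhile p).length = l.takeWhile p := by
  induction l with
  | nil => rfl
  | cons x t ih =>
    by_cases h : p x = true
    · simp [List.takeWhile_cons_of_pos h, ih]
    · simp [List.takeWhile_cons_of_neg (by simpa using h)]

theorem pvGet_nat (cs : List Char) (k : Nat) (hk : k < cs.length) :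
    PySem.List.pyGet? cs (k : Int) = some cs[k] := by
  simp [PySem.List.pyGet?, PySem.List.pyIdx?, hk]

-- A's inner loop counts the numeric run starting at position k
theorem pvInner_eq (cs : List Char) (k : Nat) (hk : k ≤ cs.length) :
    DecompInner cs (PySem.List.pyRange (k : Int) (cs.length : Int) 1) (k : Int)
      = (k : Int) + (((cs.drop k).takeWhile pvIsNum).length : Int) := by
  induction hn : cs.length - k generalizing k with
  | zero =>
    have hk' : k = cs.length := by omega
    subst hk'
    rw [PySem.List.pyRange_one_eq_nil (by omega)]
    simp [DecompInner]
  | succ m ih =>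
    have hlt : k < cs.length := by omega
    rw [PySem.List.pyRange_one_cons (by exact_mod_cast hlt)]
    have hdrop : cs.drop k = cs[k] :: cs.drop (k + 1) := List.drop_eq_getElem_cons hlt
    by_cases hc : pvIsNum cs[k] = true
    · have h1 : ((k : Int) + 1) = ((k + 1 : Nat) : Int) := by push_cast; ring
      rw [DecompInner, pvGet_nat cs k hlt]
      simp only [hc, if_true, h1]
      rw [ih (k + 1) (by omega) (by omega)]
      rw [hdrop, List.takeWhile_cons_of_pos hc]
      simp only [List.length_cons]
      push_cast
      ring
    · rw [DecompInner, pvGet_nat cs k hlt]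
      simp only [hc, if_false]
      rw [hdrop, List.takeWhile_cons_of_neg (by simpa using hc)]
      simp

-- the value A stores equals pvVal of the numeric run (lets of DecompBody written out)
theorem pvA_val (cs : List Char) (k : Nat) (hk : k ≤ cs.length) :
    (if PySem.List.slice cs (some ((k : Int)))
          (some (DecompInner cs (PySem.List.pyRange ((k : Int)) ((cs.length : Int)) 1) ((k : Int)))) ≠ [] then
       (PySem.Int.ofChars? (PySem.List.slice cs (some ((k : Int)))
          (some (DecompInner cs (PySem.List.pyRange ((k : Int)) ((cs.length : Int)) 1) ((k : Int)))))).getD 0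
     else 1)
      = pvVal ((cs.drop k).takeWhile pvIsNum) := by
  rw [pvInner_eq cs k hk]
  have hslice : PySem.List.slice cs (some ((k : Int)))
      (some ((k : Int) + (((cs.drop k).takeWhile pvIsNum).length : Int)))
      = (cs.drop k).take ((cs.drop k).takeWhile pvIsNum).length :=
    PySem.List.slice_natCast_add cs k ((cs.drop k).takeWhile pvIsNum).length
  rw [hslice, pvTake_takeWhile]
  by_cases hz : (cs.drop k).takeWhile pvIsNum = []
  · simp [hz, pvVal]
  · simp [hz, pvVal]

-- A's outer loop, started at index j, is pvRun on the suffix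
theorem pvA_loop (cs : List Char) (j : Nat) (hj : j ≤ cs.length) (d : PySem.Dict String Int) :
    (PySem.List.pyRange (j : Int) (cs.length : Int) 1).foldl (DecompBody cs) d
      = pvRun d (cs.drop j) := by
  induction hn : cs.length - j generalizing j d with
  | zero =>
    have hj' : j = cs.length := by omega
    subst hj'
    rw [PySem.List.pyRange_one_eq_nil (by omega)]
    simp [pvRun]
  | succ m ih =>
    have hlt : j < cs.length := by omega
    rw [PySem.List.pyRange_one_cons (by exact_mod_cast hlt)]
    have h1 : ((j : Int) + 1) = ((j + 1 : Nat) : Int) := by push_cast; ring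
    have hdrop : cs.drop j = cs[j] :: cs.drop (j + 1) := List.drop_eq_getElem_cons hlt
    rw [List.foldl_cons]
    by_cases ha : PySem.Chars.isalpha cs[j] = true
    · have hbody : DecompBody cs d (j : Int)
          = d.insert (String.mk [cs[j]]) (pvVal ((cs.drop (j + 1)).takeWhile pvIsNum)) := by
        unfold DecompBody
        rw [pvGet_nat cs j hlt]
        simp only [ha, if_true, h1]
        rw [← apply_ite (d.insert (String.mk [cs[j]]))]
        exact congrArg _ (pvA_val cs (j + 1) (by omega))
      rw [hbody, h1, ih (j + 1) (by omega) _ (by omega), hdrop]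
      simp [pvRun, ha]
    · have hbody : DecompBody cs d (j : Int) = d := by
        unfold DecompBody
        rw [pvGet_nat cs j hlt]
        simp [ha]
      rw [hbody, h1, ih (j + 1) (by omega) d (by omega), hdrop,
        pvRun_skip d cs[j] _ (by simpa using ha)]

-- B's fold followed by the final 'finalize' is pvRun, for both shapes of the running state
theorem pvB_loop (l : List Char) :
    (∀ d : PySem.Dict String Int,
      pvFinSt (l.foldl DecompStep (d, none, [])) = pvRun d l) ∧
    (∀ (d : PySem.Dict String Int) (c : Char) (num : List Char),
      pvFinSt (l.foldl DecompStep (d, some c, num))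
        = pvRun (d.insert (String.mk [c]) (pvVal (num ++ l.takeWhile pvIsNum)))
            (l.dropWhile pvIsNum)) := by
  induction l with
  | nil =>
    constructor
    · intro d; rfl
    · intro d c num
      simp [pvFinSt, DecompFin, pvVal, pvRun]
  | cons x rest ih =>
    constructor
    · intro d
      rw [List.foldl_cons]
      by_cases ha : PySem.Chars.isalpha x = true
      · have hstep : DecompStep (d, none, []) x = (d, some x, []) := by
          simp [DecompStep, ha, DecompFin]
        rw [hstep, ih.2 d x []]
        simp only [List.nil_append]
        rw [pvRun_dropWhile]
        simp [pvRun, ha]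
      · have hstep : DecompStep (d, none, []) x = (d, none, []) := by
          by_cases hn : pvIsNum x = true
          · simp [DecompStep, ha, hn]
          · simp [DecompStep, ha, hn, DecompFin]
        rw [hstep, ih.1 d, pvRun_skip d x rest (by simpa using ha)]
    · intro d c num
      rw [List.foldl_cons]
      by_cases ha : PySem.Chars.isalpha x = true
      · have hstep : DecompStep (d, some c, num) x
            = (d.insert (String.mk [c]) (if num = [] then 1 else (PySem.Int.ofChars? num).getD 0),
               some x, []) := by
          simp [DecompStep, ha, DecompFin]
        have hxn : pvIsNum x = false := pvAlpha_not_num ha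
        rw [hstep, ih.2 _ x []]
        rw [List.takeWhile_cons_of_neg (by simp [hxn]),
          List.dropWhile_cons_of_neg (by simp [hxn])]
        simp only [List.append_nil, List.nil_append]
        rw [pvRun_dropWhile]
        simp [pvRun, ha, pvVal]
      · by_cases hn : pvIsNum x = true
        · have hstep : DecompStep (d, some c, num) x = (d, some c, num ++ [x]) := by
            simp [DecompStep, ha, hn]
          rw [hstep, ih.2 d c (num ++ [x])]
          rw [List.takeWhile_cons_of_pos hn, List.dropWhile_cons_of_pos hn]
          simp
        · have hstep : DecompStep (d, some c, num) x
              = (d.insert (String.mk [c]) (if num = [] then 1 else (PySem.Int.ofChars? num).getD 0),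
                 none, []) := by
            simp [DecompStep, ha, hn, DecompFin]
          rw [hstep, ih.1 _]
          rw [List.takeWhile_cons_of_neg (by simp [hn]),
            List.dropWhile_cons_of_neg (by simp [hn])]
          rw [pvRun_skip _ x rest (by simpa using ha)]
          simp [pvVal]

-- ===== VERDICT (by name: the statement is the Claim_ definition above) =====
theorem Decomposition_spec : Claim_equal_Decomposition := by
  intro varTerm _
  unfold Spec_Decomposition Decomposition Decomposition_alt
  by_cases hempty : varTerm.toList = []
  · simp [hempty]
  · simp only [hempty, if_false]
    have hA := pvA_loop varTerm.toList 0 (by omega) PySem.Dict.empty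
    have hB := (pvB_loop varTerm.toList).1 PySem.Dict.empty
    rw [show ((0 : Int) = ((0 : Nat) : Int)) from rfl, hA]
    rw [show (DecompFin (varTerm.toList.foldl DecompStep (PySem.Dict.empty, none, [])).1
          (varTerm.toList.foldl DecompStep (PySem.Dict.empty, none, [])).2.1
          (varTerm.toList.foldl DecompStep (PySem.Dict.empty, none, [])).2.2
        = pvFinSt (varTerm.toList.foldl DecompStep (PySem.Dict.empty, none, []))) from rfl, hB]
    simp
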